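-- pv_equiv track=rewrite | github.com/kamini08/vestigo-data | ghidra_scripts/extract_features.py | detect_crypto_signatures
-- ===== SOURCE A (Python) =====
-- CRYPTO_CONSTANTS = {
--     # --- AES (Rijndael) ---
--     # Forward S-Box (first 16 bytes packed into 32-bit integers for detection)
--     "AES_SBOX": [0x637c777b, 0xf26b6fc5, 0x3001672b, 0xfed7ab76],
--     # Byte-wise S-Box for memory scanning
--     "AES_SBOX_BYTES": [
--         0x63, 0x7c, 0x77, 0x7b, 0xf2, 0x6b, 0x6f, 0xc5, 0x30, 0x01, 0x67, 0x2b, 0xfe, 0xd7, 0xab, 0x76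
--     ],
--     # Inverse S-Box
--     "AES_INV_SBOX": [0x52096a, 0xd53036a5, 0x38bf40a3, 0x9e81f3d7],
--     # T-Table 0 (Optimization often used in OpenSSL)
--     "AES_TE0":  [0xc66363a5, 0xf87c7c84, 0xee777799, 0xf67b7b8d],
--     # Rcon (Round Constants)
--     "AES_RCON": [0x01000000, 0x02000000, 0x04000000, 0x08000000, 0x10000000, 0x20000000],
--
--     # --- SHA Family ---
--     "SHA1_K":     [0x5A827999, 0x6ED9EBA1, 0x8F1BBCDC, 0xCA62C1D6],
--     "SHA1_INIT":  [0x67452301, 0xEFCDAB89, 0x98BADCFE, 0x10325476, 0xC3D2E1F0],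
--
--     "SHA256_K":   [0x428a2f98, 0x71374491, 0xb5c0fbcf, 0xe9b5dba5, 0x3956c25b, 0x59f111f1],
--     "SHA256_INIT":[0x6a09e667, 0xbb67ae85, 0x3c6ef372, 0xa54ff53a],
--     "SHA224_INIT":[0xc1059ed8, 0x367cd507, 0x3070dd17, 0xf70e5939],
--
--     # --- MD5 ---
--     "MD5_T":      [0xd76aa478, 0xe8c7b756, 0x242070db, 0xc1bdceee],
--     "MD5_INIT":   [0x67452301, 0xefcdab89, 0x98badcfe, 0x10325476],
--
--     # --- Stream Ciphers ---
--     # ChaCha20 / Salsa20 sigma constant "expand 32-byte k"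
--     "CHACHA_SIG": [0x61707865, 0x3320646e, 0x79622d32, 0x6b206574],
--
--     # --- Asymmetric (RSA/ECC) ---
--     # Curve P-256 Prime (secp256r1)
--     "P256_PRIME": [0xFFFFFFFF, 0x00000001, 0x00000000, 0x00000000],
--     # Curve25519 Prime (2^255 - 19)
--     "C25519_PRIME": [0x7fffffffffffffff, 0xffffffffffffffed],
--     # ASN.1 Sequence Header often found in RSA keys
--     "ASN1_SEQ":   [0x3082],
--
--     # --- PRNG ---
--     # Mersenne Twister MT19937 Matrix A
--
--     "MT19937_MATRIX_A": [0x9908b0df],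
-- }
--
-- def detect_crypto_signatures(func, immediates):
--     signatures = {
--         "has_aes_sbox": 0,
--         "has_aes_rcon": 0,
--         "has_sha_constants": 0,
--         "rsa_bigint_detected": 0,
--         "has_chacha_constants": 0
--     }
--     # Check immediates against CRYPTO_CONSTANTS
--     for val in immediates:
--         val32 = val & 0xFFFFFFFF
--         if val32 in CRYPTO_CONSTANTS.get("AES_SBOX", []) or val32 in CRYPTO_CONSTANTS.get("AES_SBOX_BYTES", []):
--             signatures["has_aes_sbox"] = 1
--         if val32 in CRYPTO_CONSTANTS.get("AES_RCON", []):
--             signatures["has_aes_rcon"] = 1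
--         if val32 in CRYPTO_CONSTANTS.get("SHA1_K", []) or val32 in CRYPTO_CONSTANTS.get("SHA256_K", []):
--             signatures["has_sha_constants"] = 1
--         if val32 in CRYPTO_CONSTANTS.get("P256_PRIME", []) or val32 in CRYPTO_CONSTANTS.get("C25519_PRIME", []):
--              signatures["rsa_bigint_detected"] = 1
--         if val32 in CRYPTO_CONSTANTS.get("CHACHA_SIG", []):
--              signatures["has_chacha_constants"] = 1
--     return signatures
-- ===== SOURCE B (Python) =====
-- # B: build a reverse index (constant value -> flag names) once, then a single
-- # lookup per immediate instead of five membership scans.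
--
-- CRYPTO_CONSTANTS = {
--     "AES_SBOX": [0x637c777b, 0xf26b6fc5, 0x3001672b, 0xfed7ab76],
--     "AES_SBOX_BYTES": [
--         0x63, 0x7c, 0x77, 0x7b, 0xf2, 0x6b, 0x6f, 0xc5, 0x30, 0x01, 0x67, 0x2b, 0xfe, 0xd7, 0xab, 0x76
--     ],
--     "AES_RCON": [0x01000000, 0x02000000, 0x04000000, 0x08000000, 0x10000000, 0x20000000],
--     "SHA1_K":     [0x5A827999, 0x6ED9EBA1, 0x8F1BBCDC, 0xCA62C1D6],
--     "SHA256_K":   [0x428a2f98, 0x71374491, 0xb5c0fbcf, 0xe9b5dba5, 0x3956c25b, 0x59f111f1],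
--     "P256_PRIME": [0xFFFFFFFF, 0x00000001, 0x00000000, 0x00000000],
--     "C25519_PRIME": [0x7fffffffffffffff, 0xffffffffffffffed],
--     "CHACHA_SIG": [0x61707865, 0x3320646e, 0x79622d32, 0x6b206574],
-- }
--
-- _FLAG_FOR_GROUP = [
--     ("AES_SBOX", "has_aes_sbox"),
--     ("AES_SBOX_BYTES", "has_aes_sbox"),
--     ("AES_RCON", "has_aes_rcon"),
--     ("SHA1_K", "has_sha_constants"),
--     ("SHA256_K", "has_sha_constants"),
--     ("P256_PRIME", "rsa_bigint_detected"),
--     ("C25519_PRIME", "rsa_bigint_detected"),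
--     ("CHACHA_SIG", "has_chacha_constants"),
-- ]
--
-- _INDEX = {}
-- for _group, _flag in _FLAG_FOR_GROUP:
--     for _c in CRYPTO_CONSTANTS[_group]:
--         _flags = _INDEX.setdefault(_c, [])
--         if _flag not in _flags:
--             _flags.append(_flag)
--
--
-- def detect_crypto_signatures(func, immediates):
--     signatures = {
--         "has_aes_sbox": 0,
--         "has_aes_rcon": 0,
--         "has_sha_constants": 0,
--         "rsa_bigint_detected": 0,
--         "has_chacha_constants": 0
--     }
--     for val in immediates:
--         for flag in _INDEX.get(val & 0xFFFFFFFF, ()):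
--             signatures[flag] = 1
--     return signatures
-- ===== Notes on version B (the rewrite author's own statement) =====
-- stated objective: faster
-- what changed: B precomputes a reverse index mapping each crypto constant to the flag names it sets (unioning flags for values appearing in several groups), then makes one dict lookup per immediate instead of A's five membership scans over the constant lists.
import Mathlib
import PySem

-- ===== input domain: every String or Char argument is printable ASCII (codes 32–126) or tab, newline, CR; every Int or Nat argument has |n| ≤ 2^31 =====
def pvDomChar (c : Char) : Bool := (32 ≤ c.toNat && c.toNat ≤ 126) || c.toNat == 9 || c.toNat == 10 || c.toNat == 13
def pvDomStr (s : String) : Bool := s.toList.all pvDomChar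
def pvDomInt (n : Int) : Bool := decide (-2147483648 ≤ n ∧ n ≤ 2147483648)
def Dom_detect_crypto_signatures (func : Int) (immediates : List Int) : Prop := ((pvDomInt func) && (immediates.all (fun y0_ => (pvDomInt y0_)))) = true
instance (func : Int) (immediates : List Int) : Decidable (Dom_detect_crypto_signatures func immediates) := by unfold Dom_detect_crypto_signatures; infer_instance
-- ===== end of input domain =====

-- B replaces A's five per-value membership scans by one lookup in a reverse index
-- (constant value -> flag names) built once before the loop; same return value.

-- ===== PORT A =====
def CRYPTO_CONSTANTS : PySem.Dict String (List Int) := PySem.Dict.ofList [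
  ("AES_SBOX", [0x637c777b, 0xf26b6fc5, 0x3001672b, 0xfed7ab76]),
  ("AES_SBOX_BYTES", [0x63, 0x7c, 0x77, 0x7b, 0xf2, 0x6b, 0x6f, 0xc5, 0x30, 0x01, 0x67, 0x2b, 0xfe, 0xd7, 0xab, 0x76]),
  ("AES_INV_SBOX", [0x52096a, 0xd53036a5, 0x38bf40a3, 0x9e81f3d7]),
  ("AES_TE0", [0xc66363a5, 0xf87c7c84, 0xee777799, 0xf67b7b8d]),
  ("AES_RCON", [0x01000000, 0x02000000, 0x04000000, 0x08000000, 0x10000000, 0x20000000]),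
  ("SHA1_K", [0x5A827999, 0x6ED9EBA1, 0x8F1BBCDC, 0xCA62C1D6]),
  ("SHA1_INIT", [0x67452301, 0xEFCDAB89, 0x98BADCFE, 0x10325476, 0xC3D2E1F0]),
  ("SHA256_K", [0x428a2f98, 0x71374491, 0xb5c0fbcf, 0xe9b5dba5, 0x3956c25b, 0x59f111f1]),
  ("SHA256_INIT", [0x6a09e667, 0xbb67ae85, 0x3c6ef372, 0xa54ff53a]),
  ("SHA224_INIT", [0xc1059ed8, 0x367cd507, 0x3070dd17, 0xf70e5939]),
  ("MD5_T", [0xd76aa478, 0xe8c7b756, 0x242070db, 0xc1bdceee]),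
  ("MD5_INIT", [0x67452301, 0xefcdab89, 0x98badcfe, 0x10325476]),
  ("CHACHA_SIG", [0x61707865, 0x3320646e, 0x79622d32, 0x6b206574]),
  ("P256_PRIME", [0xFFFFFFFF, 0x00000001, 0x00000000, 0x00000000]),
  ("C25519_PRIME", [0x7fffffffffffffff, 0xffffffffffffffed]),
  ("ASN1_SEQ", [0x3082]),
  ("MT19937_MATRIX_A", [0x9908b0df])]

def pvStepA (sig : PySem.Dict String Int) (val : Int) : PySem.Dict String Int :=
  let val32 := PySem.Int.band val 0xFFFFFFFF
  let sig := if ((CRYPTO_CONSTANTS.get? "AES_SBOX").getD []).contains val32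
                || ((CRYPTO_CONSTANTS.get? "AES_SBOX_BYTES").getD []).contains val32
             then sig.insert "has_aes_sbox" 1 else sig
  let sig := if ((CRYPTO_CONSTANTS.get? "AES_RCON").getD []).contains val32
             then sig.insert "has_aes_rcon" 1 else sig
  let sig := if ((CRYPTO_CONSTANTS.get? "SHA1_K").getD []).contains val32
                || ((CRYPTO_CONSTANTS.get? "SHA256_K").getD []).contains val32
             then sig.insert "has_sha_constants" 1 else sig
  let sig := if ((CRYPTO_CONSTANTS.get? "P256_PRIME").getD []).contains val32
                || ((CRYPTO_CONSTANTS.get? "C25519_PRIME").getD []).contains val32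
             then sig.insert "rsa_bigint_detected" 1 else sig
  let sig := if ((CRYPTO_CONSTANTS.get? "CHACHA_SIG").getD []).contains val32
             then sig.insert "has_chacha_constants" 1 else sig
  sig

def detect_crypto_signatures (func : Int) (immediates : List Int) : List (String × Int) :=
  (immediates.foldl pvStepA (PySem.Dict.ofList
    [("has_aes_sbox", 0), ("has_aes_rcon", 0), ("has_sha_constants", 0),
     ("rsa_bigint_detected", 0), ("has_chacha_constants", 0)])).items

-- ===== PORT B =====
def pvCryptoConstantsB : PySem.Dict String (List Int) := PySem.Dict.ofList [
  ("AES_SBOX", [0x637c777b, 0xf26b6fc5, 0x3001672b, 0xfed7ab76]),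
  ("AES_SBOX_BYTES", [0x63, 0x7c, 0x77, 0x7b, 0xf2, 0x6b, 0x6f, 0xc5, 0x30, 0x01, 0x67, 0x2b, 0xfe, 0xd7, 0xab, 0x76]),
  ("AES_RCON", [0x01000000, 0x02000000, 0x04000000, 0x08000000, 0x10000000, 0x20000000]),
  ("SHA1_K", [0x5A827999, 0x6ED9EBA1, 0x8F1BBCDC, 0xCA62C1D6]),
  ("SHA256_K", [0x428a2f98, 0x71374491, 0xb5c0fbcf, 0xe9b5dba5, 0x3956c25b, 0x59f111f1]),
  ("P256_PRIME", [0xFFFFFFFF, 0x00000001, 0x00000000, 0x00000000]),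
  ("C25519_PRIME", [0x7fffffffffffffff, 0xffffffffffffffed]),
  ("CHACHA_SIG", [0x61707865, 0x3320646e, 0x79622d32, 0x6b206574])]

def pvFlagForGroup : List (String × String) :=
  [("AES_SBOX", "has_aes_sbox"), ("AES_SBOX_BYTES", "has_aes_sbox"),
   ("AES_RCON", "has_aes_rcon"), ("SHA1_K", "has_sha_constants"),
   ("SHA256_K", "has_sha_constants"), ("P256_PRIME", "rsa_bigint_detected"),
   ("C25519_PRIME", "rsa_bigint_detected"), ("CHACHA_SIG", "has_chacha_constants")]

def pvIndex : PySem.Dict Int (List String) :=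
  pvFlagForGroup.foldl (fun idx gf =>
    ((pvCryptoConstantsB.get? gf.1).getD []).foldl (fun idx c =>
      let flags := idx.getD c []
      let flags := if gf.2 ∈ flags then flags else flags ++ [gf.2]
      idx.insert c flags) idx) PySem.Dict.empty

def pvStepB (sig : PySem.Dict String Int) (val : Int) : PySem.Dict String Int :=
  (pvIndex.getD (PySem.Int.band val 0xFFFFFFFF) []).foldl (fun s flag => s.insert flag 1) sig

def detect_crypto_signatures_alt (func : Int) (immediates : List Int) : List (String × Int) :=
  (immediates.foldl pvStepB (PySem.Dict.ofList
    [("has_aes_sbox", 0), ("has_aes_rcon", 0), ("has_sha_constants", 0),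
     ("rsa_bigint_detected", 0), ("has_chacha_constants", 0)])).items

-- ===== PRECONDITION & SPEC =====
def Spec_detect_crypto_signatures (func : Int) (immediates : List Int) (out : List (String × Int)) : Prop := out = detect_crypto_signatures_alt func immediates
instance (func : Int) (immediates : List Int) (out : List (String × Int)) : Decidable (Spec_detect_crypto_signatures func immediates out) := by unfold Spec_detect_crypto_signatures; infer_instance

-- ===== CLAIM (what is proved, stated in full; the proofs are below) =====
def Claim_equal_detect_crypto_signatures : Prop := ∀ (func : Int) (immediates : List Int), Dom_detect_crypto_signatures func immediates → Spec_detect_crypto_signatures func immediates (detect_crypto_signatures func immediates)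

-- ===== LEMMAS AND PROOFS =====
-- the key set of pvIndex, for case analysis in pvStep_eq (proof-only helper)
def pvKeysList : List Int := [0x637c777b, 0xf26b6fc5, 0x3001672b, 0xfed7ab76, 0x63, 0x7c, 0x77, 0x7b, 0xf2, 0x6b,
   0x6f, 0xc5, 0x30, 0x01, 0x67, 0x2b, 0xfe, 0xd7, 0xab, 0x76,
   0x01000000, 0x02000000, 0x04000000, 0x08000000, 0x10000000, 0x20000000,
   0x5A827999, 0x6ED9EBA1, 0x8F1BBCDC, 0xCA62C1D6,
   0x428a2f98, 0x71374491, 0xb5c0fbcf, 0xe9b5dba5, 0x3956c25b, 0x59f111f1,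
   0xFFFFFFFF, 0x00000000, 0x7fffffffffffffff, 0xffffffffffffffed,
   0x61707865, 0x3320646e, 0x79622d32, 0x6b206574]

set_option maxRecDepth 16384 in
lemma pvIndex_eq : pvIndex = PySem.Dict.mk [(0x637c777b, ["has_aes_sbox"]), (0xf26b6fc5, ["has_aes_sbox"]),
     (0x3001672b, ["has_aes_sbox"]), (0xfed7ab76, ["has_aes_sbox"]),
     (0x63, ["has_aes_sbox"]), (0x7c, ["has_aes_sbox"]), (0x77, ["has_aes_sbox"]),
     (0x7b, ["has_aes_sbox"]), (0xf2, ["has_aes_sbox"]), (0x6b, ["has_aes_sbox"]),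
     (0x6f, ["has_aes_sbox"]), (0xc5, ["has_aes_sbox"]), (0x30, ["has_aes_sbox"]),
     (0x01, ["has_aes_sbox", "rsa_bigint_detected"]), (0x67, ["has_aes_sbox"]),
     (0x2b, ["has_aes_sbox"]), (0xfe, ["has_aes_sbox"]), (0xd7, ["has_aes_sbox"]),
     (0xab, ["has_aes_sbox"]), (0x76, ["has_aes_sbox"]),
     (0x01000000, ["has_aes_rcon"]), (0x02000000, ["has_aes_rcon"]),
     (0x04000000, ["has_aes_rcon"]), (0x08000000, ["has_aes_rcon"]),
     (0x10000000, ["has_aes_rcon"]), (0x20000000, ["has_aes_rcon"]),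
     (0x5A827999, ["has_sha_constants"]), (0x6ED9EBA1, ["has_sha_constants"]),
     (0x8F1BBCDC, ["has_sha_constants"]), (0xCA62C1D6, ["has_sha_constants"]),
     (0x428a2f98, ["has_sha_constants"]), (0x71374491, ["has_sha_constants"]),
     (0xb5c0fbcf, ["has_sha_constants"]), (0xe9b5dba5, ["has_sha_constants"]),
     (0x3956c25b, ["has_sha_constants"]), (0x59f111f1, ["has_sha_constants"]),
     (0xFFFFFFFF, ["rsa_bigint_detected"]), (0x00000000, ["rsa_bigint_detected"]),
     (0x7fffffffffffffff, ["rsa_bigint_detected"]), (0xffffffffffffffed, ["rsa_bigint_detected"]),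
     (0x61707865, ["has_chacha_constants"]), (0x3320646e, ["has_chacha_constants"]),
     (0x79622d32, ["has_chacha_constants"]), (0x6b206574, ["has_chacha_constants"])] := by decide

set_option maxRecDepth 16384 in
set_option maxHeartbeats 4000000 in
lemma pvStep_eq (sig : PySem.Dict String Int) (val : Int) : pvStepB sig val = pvStepA sig val := by
  unfold pvStepB pvStepA
  generalize PySem.Int.band val 0xFFFFFFFF = w
  rw [pvIndex_eq]
  by_cases hw : w ∈ pvKeysList
  · fin_cases hw <;> rfl
  · have hK : (PySem.Dict.mk [(0x637c777b, ["has_aes_sbox"]), (0xf26b6fc5, ["has_aes_sbox"]),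
     (0x3001672b, ["has_aes_sbox"]), (0xfed7ab76, ["has_aes_sbox"]),
     (0x63, ["has_aes_sbox"]), (0x7c, ["has_aes_sbox"]), (0x77, ["has_aes_sbox"]),
     (0x7b, ["has_aes_sbox"]), (0xf2, ["has_aes_sbox"]), (0x6b, ["has_aes_sbox"]),
     (0x6f, ["has_aes_sbox"]), (0xc5, ["has_aes_sbox"]), (0x30, ["has_aes_sbox"]),
     (0x01, ["has_aes_sbox", "rsa_bigint_detected"]), (0x67, ["has_aes_sbox"]),
     (0x2b, ["has_aes_sbox"]), (0xfe, ["has_aes_sbox"]), (0xd7, ["has_aes_sbox"]),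
     (0xab, ["has_aes_sbox"]), (0x76, ["has_aes_sbox"]),
     (0x01000000, ["has_aes_rcon"]), (0x02000000, ["has_aes_rcon"]),
     (0x04000000, ["has_aes_rcon"]), (0x08000000, ["has_aes_rcon"]),
     (0x10000000, ["has_aes_rcon"]), (0x20000000, ["has_aes_rcon"]),
     (0x5A827999, ["has_sha_constants"]), (0x6ED9EBA1, ["has_sha_constants"]),
     (0x8F1BBCDC, ["has_sha_constants"]), (0xCA62C1D6, ["has_sha_constants"]),
     (0x428a2f98, ["has_sha_constants"]), (0x71374491, ["has_sha_constants"]),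
     (0xb5c0fbcf, ["has_sha_constants"]), (0xe9b5dba5, ["has_sha_constants"]),
     (0x3956c25b, ["has_sha_constants"]), (0x59f111f1, ["has_sha_constants"]),
     (0xFFFFFFFF, ["rsa_bigint_detected"]), (0x00000000, ["rsa_bigint_detected"]),
     (0x7fffffffffffffff, ["rsa_bigint_detected"]), (0xffffffffffffffed, ["rsa_bigint_detected"]),
     (0x61707865, ["has_chacha_constants"]), (0x3320646e, ["has_chacha_constants"]),
     (0x79622d32, ["has_chacha_constants"]), (0x6b206574, ["has_chacha_constants"])]).get? w = none := by
      rw [PySem.Dict.get?_eq_none_iff_not_mem_keys]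
      simpa [pvKeysList] using hw
    rw [PySem.Dict.getD_eq_get?_getD, hK]
    rw [Option.getD_none]
    simp only [List.foldl_nil]
    simp only [pvKeysList, List.mem_cons, not_or] at hw
    have g1 : (CRYPTO_CONSTANTS.get? "AES_SBOX").getD [] = [0x637c777b, 0xf26b6fc5, 0x3001672b, 0xfed7ab76] := rfl
    have g2 : (CRYPTO_CONSTANTS.get? "AES_SBOX_BYTES").getD [] = [0x63, 0x7c, 0x77, 0x7b, 0xf2, 0x6b, 0x6f, 0xc5, 0x30, 0x01, 0x67, 0x2b, 0xfe, 0xd7, 0xab, 0x76] := rfl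
    have g3 : (CRYPTO_CONSTANTS.get? "AES_RCON").getD [] = [0x01000000, 0x02000000, 0x04000000, 0x08000000, 0x10000000, 0x20000000] := rfl
    have g4 : (CRYPTO_CONSTANTS.get? "SHA1_K").getD [] = [0x5A827999, 0x6ED9EBA1, 0x8F1BBCDC, 0xCA62C1D6] := rfl
    have g5 : (CRYPTO_CONSTANTS.get? "SHA256_K").getD [] = [0x428a2f98, 0x71374491, 0xb5c0fbcf, 0xe9b5dba5, 0x3956c25b, 0x59f111f1] := rfl
    have g6 : (CRYPTO_CONSTANTS.get? "P256_PRIME").getD [] = [0xFFFFFFFF, 0x00000001, 0x00000000, 0x00000000] := rfl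
    have g7 : (CRYPTO_CONSTANTS.get? "C25519_PRIME").getD [] = [0x7fffffffffffffff, 0xffffffffffffffed] := rfl
    have g8 : (CRYPTO_CONSTANTS.get? "CHACHA_SIG").getD [] = [0x61707865, 0x3320646e, 0x79622d32, 0x6b206574] := rfl
    simp only [g1, g2, g3, g4, g5, g6, g7, g8]
    simp [hw]
theorem pv_main : ∀ (func : Int) (immediates : List Int), detect_crypto_signatures func immediates = detect_crypto_signatures_alt func immediates := by
  intro func immediates
  unfold detect_crypto_signatures detect_crypto_signatures_alt
  have : pvStepA = pvStepB := by
    funext sig val; exact (pvStep_eq sig val).symm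
  rw [this]

-- ===== VERDICT (by name: the statement is the Claim_ definition above) =====
theorem detect_crypto_signatures_spec : Claim_equal_detect_crypto_signatures := by
  intro func immediates _
  unfold Spec_detect_crypto_signatures
  exact pv_main func immediates
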